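-- pv_equiv track=rewrite | github.com/stenknutsen/HomeGrownPOSTagger | PhaseFiveTagging.py | IN_N_and_UNK_PUNC_Tagger
-- ===== SOURCE A (Python) =====
-- def IN_N_and_UNK_PUNC_Tagger(sent):
--     sentToReturn = []
--     skip = 0
--
--     for i in range(len(sent)):
--
--         if skip>0:
--             skip = skip -1
--             continue
--
--
--         if (i)<0 | (i+4)>=len(sent):
--             sentToReturn += [sent[i]]
--             continue
--
--         leftContext = sent[i]
--         leftTarget = sent[i+1]
--         centerTarget = sent[i+2]
--         rightTarget = sent[i+3]
--         rightContext = sent[i+4]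
--
--
--         if (leftContext[1]=="IN")&(leftTarget[1].startswith("N"))&(centerTarget[0].lower()=="and")&\
--                 (rightTarget[1]=="UNK")&(rightTarget[0].endswith("ing"))&(rightContext[1]==","):
--
--             sentToReturn += [leftContext]
--             sentToReturn += [leftTarget]
--             sentToReturn += [centerTarget]
--             sentToReturn += [(rightTarget[0],"N")]
--             sentToReturn += [rightContext]
--             skip = 4
--
--         else:
--             sentToReturn += [leftContext]
--
--     return sentToReturn
-- ===== SOURCE B (Python) =====
-- def IN_N_and_UNK_PUNC_Tagger(sent):
--     n = len(sent)
--     retag = set()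
--     i = 0
--     while i < n:
--         if i + 4 < n and _window_matches(sent, i):
--             retag.add(i + 3)
--             i += 5
--         else:
--             i += 1
--     return [(sent[j][0], "N") if j in retag else sent[j] for j in range(n)]
--
--
-- def _window_matches(sent, i):
--     leftContext = sent[i]
--     leftTarget = sent[i + 1]
--     centerTarget = sent[i + 2]
--     rightTarget = sent[i + 3]
--     rightContext = sent[i + 4]
--     return (leftContext[1] == "IN" and leftTarget[1].startswith("N")
--             and centerTarget[0].lower() == "and"
--             and rightTarget[1] == "UNK" and rightTarget[0].endswith("ing")
--             and rightContext[1] == ",")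
-- ===== Notes on version B (the rewrite author's own statement) =====
-- stated objective: alternative
-- what changed: A's single accumulating loop with a skip counter is replaced by two passes: a scan that collects the set of positions to retag (jumping 5 ahead on each match), then an index comprehension that rebuilds the sentence, retagging exactly those positions.
import Mathlib
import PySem

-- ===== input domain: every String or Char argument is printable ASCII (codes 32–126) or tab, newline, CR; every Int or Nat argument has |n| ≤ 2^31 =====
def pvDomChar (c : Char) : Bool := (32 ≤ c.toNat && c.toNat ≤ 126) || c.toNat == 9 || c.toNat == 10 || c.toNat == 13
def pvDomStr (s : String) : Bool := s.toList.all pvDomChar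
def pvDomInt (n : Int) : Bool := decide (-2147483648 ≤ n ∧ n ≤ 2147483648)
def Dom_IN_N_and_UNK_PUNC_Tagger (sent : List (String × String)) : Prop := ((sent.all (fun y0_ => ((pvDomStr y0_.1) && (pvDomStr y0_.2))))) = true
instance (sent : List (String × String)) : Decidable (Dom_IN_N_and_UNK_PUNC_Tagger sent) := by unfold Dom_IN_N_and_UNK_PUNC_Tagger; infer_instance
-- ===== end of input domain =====

-- B replaces A's single accumulating loop by two passes — a scan collecting the set of
-- positions to retag, then an index comprehension rebuilding the sentence (objective: alternative).

-- ===== PORT A =====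
-- A's for-loop over range(len(sent)) with the accumulator sentToReturn and the skip counter;
-- the loop is transcribed with a structural fuel argument (one unit per loop iteration,
-- started at len(sent), exactly the number of iterations Python performs).
-- Python's `(i)<0 | (i+4)>=len(sent)` parses as the chained comparison i < (0 | (i+4)) >= len(sent);
-- it is ported literally as the conjunction of the two comparisons around 0 ||| (i+4).
-- All indices i..i+4 are in range when read (guarded by that test), so sent[j] is List.getD.
def pvLoopA (sent : List (String × String)) :
    Nat → Nat → List (String × String) → Int → List (String × String)
  | 0, _, acc, _ => acc
  | fuel + 1, i, acc, skip =>
    if i < sent.length then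
      if skip > 0 then pvLoopA sent fuel (i + 1) acc (skip - 1)
      else if decide (i < (0 ||| (i + 4))) && decide (sent.length ≤ (0 ||| (i + 4))) then
        pvLoopA sent fuel (i + 1) (acc ++ [sent.getD i ("", "")]) skip
      else
        let leftContext := sent.getD i ("", "")
        let leftTarget := sent.getD (i + 1) ("", "")
        let centerTarget := sent.getD (i + 2) ("", "")
        let rightTarget := sent.getD (i + 3) ("", "")
        let rightContext := sent.getD (i + 4) ("", "")
        if (leftContext.2 == "IN") && PySem.Str.startswith leftTarget.2 "N" &&
            (PySem.Str.lower centerTarget.1 == "and") && (rightTarget.2 == "UNK") &&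
            PySem.Str.endswith rightTarget.1 "ing" && (rightContext.2 == ",") then
          pvLoopA sent fuel (i + 1)
            (acc ++ [leftContext] ++ [leftTarget] ++ [centerTarget] ++ [(rightTarget.1, "N")] ++ [rightContext]) 4
        else pvLoopA sent fuel (i + 1) (acc ++ [leftContext]) skip
    else acc

def IN_N_and_UNK_PUNC_Tagger (sent : List (String × String)) : List (String × String) :=
  pvLoopA sent sent.length 0 [] 0

-- ===== PORT B =====
-- _window_matches(sent, i) of Source B (only called with i+4 < len(sent)).
def pvWindowMatches (sent : List (String × String)) (i : Nat) : Bool :=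
  let leftContext := sent.getD i ("", "")
  let leftTarget := sent.getD (i + 1) ("", "")
  let centerTarget := sent.getD (i + 2) ("", "")
  let rightTarget := sent.getD (i + 3) ("", "")
  let rightContext := sent.getD (i + 4) ("", "")
  (leftContext.2 == "IN") && PySem.Str.startswith leftTarget.2 "N" &&
    (PySem.Str.lower centerTarget.1 == "and") && (rightTarget.2 == "UNK") &&
    PySem.Str.endswith rightTarget.1 "ing" && (rightContext.2 == ",")

-- Source B's while-loop (fuel = len(sent), one unit per iteration): collect the retag positions i+3.
def pvScanB (sent : List (String × String)) : Nat → Nat → PySem.Set Nat → PySem.Set Nat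
  | 0, _, retag => retag
  | fuel + 1, i, retag =>
    if i < sent.length then
      if i + 4 < sent.length && pvWindowMatches sent i then
        pvScanB sent fuel (i + 5) (PySem.Set.add retag (i + 3))
      else pvScanB sent fuel (i + 1) retag
    else retag

-- the comprehension's element at index j
def pvEmit (sent : List (String × String)) (retag : PySem.Set Nat) (j : Nat) : String × String :=
  if PySem.Set.contains retag j then ((sent.getD j ("", "")).1, "N") else sent.getD j ("", "")

def IN_N_and_UNK_PUNC_Tagger_alt (sent : List (String × String)) : List (String × String) :=
  let retag := pvScanB sent sent.length 0 PySem.Set.empty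
  (List.range sent.length).map (pvEmit sent retag)

-- ===== PRECONDITION & SPEC =====
def Spec_IN_N_and_UNK_PUNC_Tagger (sent : List (String × String)) (out : List (String × String)) : Prop := out = IN_N_and_UNK_PUNC_Tagger_alt sent
instance (sent : List (String × String)) (out : List (String × String)) : Decidable (Spec_IN_N_and_UNK_PUNC_Tagger sent out) := by unfold Spec_IN_N_and_UNK_PUNC_Tagger; infer_instance

-- ===== CLAIM (what is proved, stated in full; the proofs are below) =====
def Claim_equal_IN_N_and_UNK_PUNC_Tagger : Prop := ∀ (sent : List (String × String)), Dom_IN_N_and_UNK_PUNC_Tagger sent → Spec_IN_N_and_UNK_PUNC_Tagger sent (IN_N_and_UNK_PUNC_Tagger sent)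

-- ===== LEMMAS AND PROOFS =====

-- step lemmas unfolding one iteration of B's scan
lemma pvScanB_stop (sent : List (String × String)) (fuel i : Nat) (r : PySem.Set Nat)
    (h : ¬ i < sent.length) : pvScanB sent fuel i r = r := by
  cases fuel with
  | zero => rfl
  | succ fuel => simp only [pvScanB]; rw [if_neg h]

lemma pvScanB_match (sent : List (String × String)) (fuel i : Nat) (r : PySem.Set Nat)
    (h : i + 4 < sent.length) (hm : pvWindowMatches sent i = true) :
    pvScanB sent (fuel + 1) i r = pvScanB sent fuel (i + 5) (PySem.Set.add r (i + 3)) := by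
  simp only [pvScanB]
  rw [if_pos (by omega), if_pos (by simp [hm]; omega)]

lemma pvScanB_step (sent : List (String × String)) (fuel i : Nat) (r : PySem.Set Nat)
    (h : i < sent.length) (hm : ¬ (i + 4 < sent.length ∧ pvWindowMatches sent i = true)) :
    pvScanB sent (fuel + 1) i r = pvScanB sent fuel (i + 1) r := by
  simp only [pvScanB]
  rw [if_pos h, if_neg (fun hc => hm (by simpa using hc))]

-- the scan's result does not depend on the fuel, as long as it covers the remaining indices
lemma pvScanB_fuel (sent : List (String × String)) :
    ∀ f1 f2 i r, sent.length - i ≤ f1 → sent.length - i ≤ f2 →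
      pvScanB sent f1 i r = pvScanB sent f2 i r := by
  intro f1
  induction f1 with
  | zero =>
    intro f2 i r h1 h2
    rw [pvScanB_stop sent 0 i r (by omega), pvScanB_stop sent f2 i r (by omega)]
  | succ f1 ih =>
    intro f2 i r h1 h2
    by_cases hi : i < sent.length
    · cases f2 with
      | zero => omega
      | succ f2 =>
        by_cases hm : i + 4 < sent.length ∧ pvWindowMatches sent i = true
        · rw [pvScanB_match sent f1 i r hm.1 hm.2, pvScanB_match sent f2 i r hm.1 hm.2]
          exact ih f2 (i + 5) _ (by omega) (by omega)
        · rw [pvScanB_step sent f1 i r hi hm, pvScanB_step sent f2 i r hi hm]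
          exact ih f2 (i + 1) _ (by omega) (by omega)
    · rw [pvScanB_stop sent _ i r hi, pvScanB_stop sent f2 i r hi]

-- every position the scan adds past an accumulator lies at least 3 beyond the scan start
lemma pvScanB_mem_ge (sent : List (String × String)) :
    ∀ fuel i r j, j ∈ pvScanB sent fuel i r → j ∈ r ∨ i + 3 ≤ j := by
  intro fuel
  induction fuel with
  | zero => intro i r j hj; exact Or.inl hj
  | succ fuel ih =>
    intro i r j hj
    by_cases hi : i < sent.length
    · by_cases hm : i + 4 < sent.length ∧ pvWindowMatches sent i = true
      · rw [pvScanB_match sent fuel i r hm.1 hm.2] at hj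
        rcases ih (i + 5) _ j hj with h | h
        · rcases (PySem.Set.mem_add _ _ _).1 h with h | h
          · exact Or.inl h
          · omega
        · omega
      · rw [pvScanB_step sent fuel i r hi hm] at hj
        rcases ih (i + 1) _ j hj with h | h
        · exact Or.inl h
        · omega
    · rw [pvScanB_stop sent _ i r hi] at hj
      exact Or.inl hj

-- membership in the scan's result splits into the accumulator and the scan from the empty set
lemma pvScanB_mem_iff (sent : List (String × String)) :
    ∀ fuel i r j, j ∈ pvScanB sent fuel i r ↔ j ∈ r ∨ j ∈ pvScanB sent fuel i PySem.Set.empty := by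
  intro fuel
  induction fuel with
  | zero => intro i r j; simp [pvScanB, PySem.Set.empty]
  | succ fuel ih =>
    intro i r j
    by_cases hi : i < sent.length
    · by_cases hm : i + 4 < sent.length ∧ pvWindowMatches sent i = true
      · rw [pvScanB_match sent fuel i r hm.1 hm.2, pvScanB_match sent fuel i _ hm.1 hm.2]
        rw [ih (i + 5) _ j, ih (i + 5) (PySem.Set.add PySem.Set.empty (i + 3)) j,
          PySem.Set.mem_add, PySem.Set.mem_add]
        simp [PySem.Set.empty]
        try tauto
      · rw [pvScanB_step sent fuel i r hi hm, pvScanB_step sent fuel i _ hi hm]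
        exact ih (i + 1) _ j
    · rw [pvScanB_stop sent _ i r hi, pvScanB_stop sent _ i _ hi]
      simp [PySem.Set.empty]

-- step lemmas unfolding one iteration of A's loop
lemma pvLoopA_stop (sent : List (String × String)) (fuel i : Nat) (acc : List (String × String))
    (skip : Int) (h : ¬ i < sent.length) : pvLoopA sent fuel i acc skip = acc := by
  cases fuel with
  | zero => rfl
  | succ fuel => simp only [pvLoopA]; rw [if_neg h]

lemma pvLoopA_skipstep (sent : List (String × String)) (fuel i : Nat) (acc : List (String × String))
    (skip : Int) (h : i < sent.length) (hs : skip > 0) :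
    pvLoopA sent (fuel + 1) i acc skip = pvLoopA sent fuel (i + 1) acc (skip - 1) := by
  simp only [pvLoopA]
  rw [if_pos h, if_pos hs]

lemma pvLoopA_bound (sent : List (String × String)) (fuel i : Nat) (acc : List (String × String))
    (h : i < sent.length) (hb : sent.length ≤ i + 4) :
    pvLoopA sent (fuel + 1) i acc 0 = pvLoopA sent fuel (i + 1) (acc ++ [sent.getD i ("", "")]) 0 := by
  simp only [pvLoopA]
  rw [if_pos h, if_neg (by norm_num), if_pos (by simp [Nat.zero_or]; omega)]

lemma pvLoopA_nomatch (sent : List (String × String)) (fuel i : Nat) (acc : List (String × String))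
    (h : i + 4 < sent.length) (hm : pvWindowMatches sent i = false) :
    pvLoopA sent (fuel + 1) i acc 0 = pvLoopA sent fuel (i + 1) (acc ++ [sent.getD i ("", "")]) 0 := by
  simp only [pvLoopA]
  rw [if_pos (by omega), if_neg (by norm_num), if_neg (by simp [Nat.zero_or]; omega)]
  rw [if_neg (by simpa [pvWindowMatches] using hm)]

lemma pvLoopA_match (sent : List (String × String)) (fuel i : Nat) (acc : List (String × String))
    (h : i + 4 < sent.length) (hm : pvWindowMatches sent i = true) :
    pvLoopA sent (fuel + 1) i acc 0 = pvLoopA sent fuel (i + 1)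
      (acc ++ [sent.getD i ("", "")] ++ [sent.getD (i + 1) ("", "")] ++ [sent.getD (i + 2) ("", "")]
        ++ [((sent.getD (i + 3) ("", "")).1, "N")] ++ [sent.getD (i + 4) ("", "")]) 4 := by
  simp only [pvLoopA]
  rw [if_pos (by omega), if_neg (by norm_num), if_neg (by simp [Nat.zero_or]; omega)]
  rw [if_pos (by simpa [pvWindowMatches] using hm)]

-- A's skip = 4 after a match fast-forwards the loop by four indices
lemma pvLoopA_skip4 (sent : List (String × String)) (fuel i : Nat) (acc : List (String × String))
    (h : i + 4 < sent.length) :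
    pvLoopA sent (fuel + 4) (i + 1) acc 4 = pvLoopA sent fuel (i + 5) acc 0 := by
  rw [show fuel + 4 = fuel + 3 + 1 by omega,
    pvLoopA_skipstep sent (fuel + 3) (i + 1) acc 4 (by omega) (by norm_num)]
  rw [show fuel + 3 = fuel + 2 + 1 by omega,
    pvLoopA_skipstep sent (fuel + 2) (i + 1 + 1) acc _ (by omega) (by norm_num)]
  rw [show fuel + 2 = fuel + 1 + 1 by omega,
    pvLoopA_skipstep sent (fuel + 1) (i + 1 + 1 + 1) acc _ (by omega) (by norm_num)]
  rw [pvLoopA_skipstep sent fuel (i + 1 + 1 + 1 + 1) acc _ (by omega) (by norm_num)]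
  norm_num

-- main invariant: from index i with the canonical fuel, A's loop appends exactly B's rendering of [i, n)
lemma pvLoopA_eq_render (sent : List (String × String)) :
    ∀ k i acc, sent.length - i ≤ k →
      pvLoopA sent (sent.length - i) i acc 0 =
        acc ++ (List.range' i (sent.length - i)).map
          (pvEmit sent (pvScanB sent (sent.length - i) i PySem.Set.empty)) := by
  intro k
  induction k with
  | zero =>
    intro i acc hk
    rw [pvLoopA_stop sent _ i acc 0 (by omega), show sent.length - i = 0 by omega]
    simp
  | succ k ih =>
    intro i acc hk
    by_cases hi : i < sent.length
    · have hrange : List.range' i (sent.length - i) = i :: List.range' (i + 1) (sent.length - (i + 1)) := by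
        rw [show sent.length - i = sent.length - (i + 1) + 1 by omega, List.range'_succ]
      by_cases hb : sent.length ≤ i + 4
      · -- boundary: full window does not fit; A emits sent[i], B's scan moves one step
        rw [show sent.length - i = sent.length - (i + 1) + 1 by omega]
        rw [pvLoopA_bound sent _ i acc hi hb, ih (i + 1) _ (by omega),
          pvScanB_step sent _ i _ hi (by omega)]
        rw [show sent.length - i = sent.length - (i + 1) + 1 by omega] at hrange
        rw [hrange]
        have hnotmem : pvEmit sent (pvScanB sent (sent.length - (i + 1)) (i + 1) PySem.Set.empty) i
            = sent.getD i ("", "") := by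
          rw [pvEmit, if_neg]
          intro hc
          rcases pvScanB_mem_ge sent _ (i + 1) PySem.Set.empty i
            ((PySem.Set.contains_iff _ _).1 hc) with h | h
          · simp [PySem.Set.empty] at h
          · omega
        rw [List.map_cons, hnotmem]
        simp
      · have hwin : i + 4 < sent.length := by omega
        by_cases hm : pvWindowMatches sent i = true
        · -- match: A emits the five tokens and skips 4; B's scan records i+3 and jumps to i+5
          rw [show sent.length - i = sent.length - (i + 5) + 4 + 1 by omega]
          rw [pvLoopA_match sent _ i acc hwin hm, pvLoopA_skip4 sent _ i _ hwin,
            ih (i + 5) _ (by omega)]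
          rw [pvScanB_match sent _ i _ hwin hm,
            pvScanB_fuel sent (sent.length - (i + 5) + 4) (sent.length - (i + 5)) (i + 5) _
              (by omega) (by omega)]
          have hrange5 : List.range' i (sent.length - (i + 5) + 4 + 1) =
              i :: (i + 1) :: (i + 2) :: (i + 3) :: (i + 4) ::
                List.range' (i + 5) (sent.length - (i + 5)) := by
            rw [show sent.length - (i + 5) + 4 + 1 = sent.length - (i + 5) + 1 + 1 + 1 + 1 + 1 by omega,
              List.range'_succ, List.range'_succ, List.range'_succ, List.range'_succ,
              List.range'_succ]
          rw [hrange5]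
          have hmemiff : ∀ j, j ∈ pvScanB sent (sent.length - (i + 5)) (i + 5) (PySem.Set.add PySem.Set.empty (i + 3)) ↔
              j = i + 3 ∨ j ∈ pvScanB sent (sent.length - (i + 5)) (i + 5) PySem.Set.empty := by
            intro j
            rw [pvScanB_mem_iff sent _ (i + 5) _ j, PySem.Set.mem_add]
            simp [PySem.Set.empty]
            try tauto
          have hge : ∀ j, j ∈ pvScanB sent (sent.length - (i + 5)) (i + 5) PySem.Set.empty → i + 8 ≤ j := by
            intro j hj
            rcases pvScanB_mem_ge sent _ (i + 5) PySem.Set.empty j hj with h | h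
            · simp [PySem.Set.empty] at h
            · omega
          have hnotmem : ∀ j, j ≠ i + 3 → j < i + 8 →
              pvEmit sent (pvScanB sent (sent.length - (i + 5)) (i + 5) (PySem.Set.add PySem.Set.empty (i + 3))) j
                = sent.getD j ("", "") := by
            intro j hne hlt
            rw [pvEmit, if_neg]
            intro hc
            rcases (hmemiff j).1 ((PySem.Set.contains_iff _ _).1 hc) with h | h
            · exact hne h
            · exact absurd (hge j h) (by omega)
          have hmem3 : pvEmit sent (pvScanB sent (sent.length - (i + 5)) (i + 5) (PySem.Set.add PySem.Set.empty (i + 3))) (i + 3)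
              = ((sent.getD (i + 3) ("", "")).1, "N") := by
            rw [pvEmit, if_pos]
            exact (PySem.Set.contains_iff _ _).2 ((hmemiff (i + 3)).2 (Or.inl rfl))
          have htail : (List.range' (i + 5) (sent.length - (i + 5))).map
                (pvEmit sent (pvScanB sent (sent.length - (i + 5)) (i + 5) (PySem.Set.add PySem.Set.empty (i + 3))))
              = (List.range' (i + 5) (sent.length - (i + 5))).map
                (pvEmit sent (pvScanB sent (sent.length - (i + 5)) (i + 5) PySem.Set.empty)) := by
            apply List.map_congr_left
            intro j hj
            have hj5 : i + 5 ≤ j := (List.mem_range'_1.1 hj).1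
            rw [pvEmit, pvEmit]
            congr 1
            simp only [eq_iff_iff]
            rw [PySem.Set.contains_iff, PySem.Set.contains_iff, hmemiff j]
            constructor
            · rintro (h | h)
              · omega
              · exact h
            · exact Or.inr
          simp only [List.map_cons]
          rw [hnotmem i (by omega) (by omega), hnotmem (i + 1) (by omega) (by omega),
            hnotmem (i + 2) (by omega) (by omega), hmem3, hnotmem (i + 4) (by omega) (by omega),
            htail]
          simp
        · -- no match: A emits sent[i]; B's scan moves one step
          rw [show sent.length - i = sent.length - (i + 1) + 1 by omega]
          rw [pvLoopA_nomatch sent _ i acc hwin (by simpa using hm), ih (i + 1) _ (by omega),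
            pvScanB_step sent _ i _ hi (fun hc => hm hc.2)]
          rw [show sent.length - i = sent.length - (i + 1) + 1 by omega] at hrange
          rw [hrange]
          have hnotmem : pvEmit sent (pvScanB sent (sent.length - (i + 1)) (i + 1) PySem.Set.empty) i
              = sent.getD i ("", "") := by
            rw [pvEmit, if_neg]
            intro hc
            rcases pvScanB_mem_ge sent _ (i + 1) PySem.Set.empty i
              ((PySem.Set.contains_iff _ _).1 hc) with h | h
            · simp [PySem.Set.empty] at h
            · omega
          rw [List.map_cons, hnotmem]
          simp
    · rw [pvLoopA_stop sent _ i acc 0 hi, show sent.length - i = 0 by omega]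
      simp

-- ===== VERDICT (by name: the statement is the Claim_ definition above) =====
theorem IN_N_and_UNK_PUNC_Tagger_spec : Claim_equal_IN_N_and_UNK_PUNC_Tagger := by
  intro sent _
  unfold Spec_IN_N_and_UNK_PUNC_Tagger IN_N_and_UNK_PUNC_Tagger IN_N_and_UNK_PUNC_Tagger_alt
  have h := pvLoopA_eq_render sent sent.length 0 [] (by omega)
  rw [Nat.sub_zero] at h
  rw [h]
  simp [List.range_eq_range']
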